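-- pv_equiv track=rewrite | github.com/CanOkan917/KocUniverstySummerCamp | 01Projects/SquidGame.py | generate_shape
-- ===== SOURCE A (Python) =====
-- def generate_shape(shape_id, size):
--     shape = ""
--     total_stars = 0
--     if shape_id == 1:
--         for row in range(size):
--             if row != 0:
--                 shape += "\n"
--             for col in range(size):
--                 shape += "* "
--                 total_stars += 1
--     elif shape_id == 2:
--         for row in range(1, size + 1):
--             if row != 1:
--                 shape += "\n"
--             for _ in range(size - row):
--                 shape += "  "
--             for _ in range(row):
--                 shape += "* "
--                 total_stars += 1
--     elif shape_id == 3: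
--         for row in range(size):
--             if row != 0:
--                 shape += "\n"
--             for _ in range(row):
--                 shape += " "
--             for _ in range(size - row):
--                 shape += "* "
--                 total_stars += 1
--     elif shape_id == 4:
--         n_rows = 0
--         c = 1
--         while c <= size:
--             c += 2
--             n_rows += 1
--         for row in range(n_rows, 0, -1):
--             for _ in range(n_rows - row):
--                 shape += " "
--             for _ in range(1, 2 * row):
--                 shape += "*"
--                 total_stars += 1
--             shape += "\n"
--         for row in range(2, n_rows + 1):
--             for _ in range(n_rows - row):
--                 shape += " "
--             for _ in range(1, 2 * row):
--                 shape += "*"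
--                 total_stars += 1
--             if row != n_rows:
--                 shape += "\n"
--     return shape, total_stars
-- ===== SOURCE B (Python) =====
-- def generate_shape(shape_id, size):
--     # Build each figure as row strings joined with '\n'; count stars by closed form.
--     n = max(size, 0)
--     if shape_id == 1:
--         return "\n".join("* " * n for _ in range(n)), n * n
--     if shape_id == 2:
--         return "\n".join("  " * (n - r) + "* " * r for r in range(1, n + 1)), n * (n + 1) // 2
--     if shape_id == 3:
--         return "\n".join(" " * r + "* " * (n - r) for r in range(n)), n * (n + 1) // 2
--     if shape_id == 4:
--         m = (n + 1) // 2
--         top = "".join(" " * (m - r) + "*" * (2 * r - 1) + "\n" for r in range(m, 0, -1))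
--         bottom = "\n".join(" " * (m - r) + "*" * (2 * r - 1) for r in range(2, m + 1))
--         return top + bottom, 2 * m * m - 1 if m else 0
--     return "", 0
-- ===== Notes on version B (the rewrite author's own statement) =====
-- stated objective: faster
-- what changed: Replaces the per-character accumulator loops, the star-by-star counter and the while loop for the diamond's row count with per-row strings built by string repetition and joined with '\n', closed-form star counts (n*n, n*(n+1)//2, 2*m*m-1), and m=(n+1)//2 computed directly.
import Mathlib
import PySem

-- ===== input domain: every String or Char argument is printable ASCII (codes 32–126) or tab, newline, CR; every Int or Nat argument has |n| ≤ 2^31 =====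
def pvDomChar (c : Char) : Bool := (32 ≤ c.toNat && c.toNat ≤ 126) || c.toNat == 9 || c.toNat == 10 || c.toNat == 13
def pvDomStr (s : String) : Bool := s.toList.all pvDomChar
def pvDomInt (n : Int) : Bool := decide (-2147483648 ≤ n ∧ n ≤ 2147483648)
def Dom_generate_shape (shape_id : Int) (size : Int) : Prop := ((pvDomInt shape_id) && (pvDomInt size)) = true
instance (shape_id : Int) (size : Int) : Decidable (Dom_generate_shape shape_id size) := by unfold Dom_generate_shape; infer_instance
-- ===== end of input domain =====

-- B builds each figure as per-row strings joined with '\n' and counts stars by closed form,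
-- instead of per-character appends, a star-by-star counter and a while loop (bulk string ops, no per-star work).

-- ===== PORT A =====
-- the 'while c <= size: c += 2; n_rows += 1' loop of shape 4
def gsA_while (c : Int) (n_rows : Int) (size : Int) : Int :=
  if c ≤ size then gsA_while (c + 2) (n_rows + 1) size else n_rows
termination_by (size + 1 - c).toNat
decreasing_by omega

def generate_shape (shape_id : Int) (size : Int) : String × Int :=
  -- the accumulated python 'shape' string is carried as its list of characters
  let st : List Char × Int :=
    if shape_id == 1 then
      (PySem.List.pyRange 0 size 1).foldl (fun st row =>
        let st := if row != 0 then (st.1 ++ ['\n'], st.2) else st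
        (PySem.List.pyRange 0 size 1).foldl (fun st _ => (st.1 ++ ['*', ' '], st.2 + 1)) st)
        ([], 0)
    else if shape_id == 2 then
      (PySem.List.pyRange 1 (size + 1) 1).foldl (fun st row =>
        let st := if row != 1 then (st.1 ++ ['\n'], st.2) else st
        let st := (PySem.List.pyRange 0 (size - row) 1).foldl (fun st _ => (st.1 ++ [' ', ' '], st.2)) st
        (PySem.List.pyRange 0 row 1).foldl (fun st _ => (st.1 ++ ['*', ' '], st.2 + 1)) st)
        ([], 0)
    else if shape_id == 3 then
      (PySem.List.pyRange 0 size 1).foldl (fun st row =>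
        let st := if row != 0 then (st.1 ++ ['\n'], st.2) else st
        let st := (PySem.List.pyRange 0 row 1).foldl (fun st _ => (st.1 ++ [' '], st.2)) st
        (PySem.List.pyRange 0 (size - row) 1).foldl (fun st _ => (st.1 ++ ['*', ' '], st.2 + 1)) st)
        ([], 0)
    else if shape_id == 4 then
      let n_rows := gsA_while 1 0 size
      let st := (PySem.List.pyRange n_rows 0 (-1)).foldl (fun st row =>
        let st := (PySem.List.pyRange 0 (n_rows - row) 1).foldl (fun st _ => (st.1 ++ [' '], st.2)) st
        let st := (PySem.List.pyRange 1 (2 * row) 1).foldl (fun st _ => (st.1 ++ ['*'], st.2 + 1)) st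
        (st.1 ++ ['\n'], st.2)) ([], 0)
      (PySem.List.pyRange 2 (n_rows + 1) 1).foldl (fun st row =>
        let st := (PySem.List.pyRange 0 (n_rows - row) 1).foldl (fun st _ => (st.1 ++ [' '], st.2)) st
        let st := (PySem.List.pyRange 1 (2 * row) 1).foldl (fun st _ => (st.1 ++ ['*'], st.2 + 1)) st
        if row != n_rows then (st.1 ++ ['\n'], st.2) else st) st
    else ([], 0)
  (String.ofList st.1, st.2)

-- ===== PORT B =====
def generate_shape_alt (shape_id : Int) (size : Int) : String × Int :=
  let n := max size 0
  if shape_id == 1 then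
    (String.ofList (PySem.Chars.join ['\n']
      ((PySem.List.pyRange 0 n 1).map (fun _ => PySem.List.pyRepeat ['*', ' '] n))), n * n)
  else if shape_id == 2 then
    (String.ofList (PySem.Chars.join ['\n']
      ((PySem.List.pyRange 1 (n + 1) 1).map (fun r =>
        PySem.List.pyRepeat [' ', ' '] (n - r) ++ PySem.List.pyRepeat ['*', ' '] r))),
     PySem.Int.floordiv (n * (n + 1)) 2)
  else if shape_id == 3 then
    (String.ofList (PySem.Chars.join ['\n']
      ((PySem.List.pyRange 0 n 1).map (fun r =>
        PySem.List.pyRepeat [' '] r ++ PySem.List.pyRepeat ['*', ' '] (n - r)))),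
     PySem.Int.floordiv (n * (n + 1)) 2)
  else if shape_id == 4 then
    let m := PySem.Int.floordiv (n + 1) 2
    let top := PySem.Chars.join []
      ((PySem.List.pyRange m 0 (-1)).map (fun r =>
        PySem.List.pyRepeat [' '] (m - r) ++ PySem.List.pyRepeat ['*'] (2 * r - 1) ++ ['\n']))
    let bottom := PySem.Chars.join ['\n']
      ((PySem.List.pyRange 2 (m + 1) 1).map (fun r =>
        PySem.List.pyRepeat [' '] (m - r) ++ PySem.List.pyRepeat ['*'] (2 * r - 1)))
    (String.ofList (top ++ bottom), if m != 0 then 2 * m * m - 1 else 0)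
  else (String.ofList [], 0)

-- ===== PRECONDITION & SPEC =====
def Spec_generate_shape (shape_id : Int) (size : Int) (out : String × Int) : Prop := out = generate_shape_alt shape_id size
instance (shape_id : Int) (size : Int) (out : String × Int) : Decidable (Spec_generate_shape shape_id size out) := by unfold Spec_generate_shape; infer_instance

-- ===== CLAIM (what is proved, stated in full; the proofs are below) =====
def Claim_equal_generate_shape : Prop := ∀ (shape_id : Int) (size : Int), Dom_generate_shape shape_id size → Spec_generate_shape shape_id size (generate_shape shape_id size)

-- ===== LEMMAS AND PROOFS =====

-- a loop appending a constant chunk and a constant count each iteration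
lemma foldl_const_chunk (l : List Int) (cs : List Char) (d : Int) (st : List Char × Int) :
    l.foldl (fun st (_ : Int) => (st.1 ++ cs, st.2 + d)) st
      = (st.1 ++ (List.replicate l.length cs).flatten, st.2 + d * l.length) := by
  induction l generalizing st with
  | nil => simp
  | cons x t ih =>
    simp only [List.foldl_cons, ih, List.length_cons, List.replicate_succ, List.flatten_cons,
      List.append_assoc]
    refine Prod.ext rfl ?_
    simp; ring

lemma foldl_const_chunk0 (l : List Int) (cs : List Char) (st : List Char × Int) :
    l.foldl (fun st (_ : Int) => (st.1 ++ cs, st.2)) st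
      = (st.1 ++ (List.replicate l.length cs).flatten, st.2) := by
  induction l generalizing st with
  | nil => simp
  | cons x t ih =>
    simp only [List.foldl_cons, ih, List.length_cons, List.replicate_succ, List.flatten_cons,
      List.append_assoc]

lemma pyRepeat_eq_flatten (cs : List Char) (k : Int) :
    PySem.List.pyRepeat cs k = (List.replicate k.toNat cs).flatten := by
  simp [PySem.List.pyRepeat]

lemma floordiv_two (a : Int) : PySem.Int.floordiv a 2 = a / 2 := by
  simp [PySem.Int.floordiv, Int.fdiv_eq_ediv]

lemma join_nil_sep (parts : List (List Char)) :
    PySem.Chars.join [] parts = parts.flatten := by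
  induction parts with
  | nil => simp [PySem.Chars.join_nil]
  | cons x t ih =>
    cases t with
    | nil => simp [PySem.Chars.join_singleton]
    | cons y u => rw [PySem.Chars.join_cons_cons]; simp_all

lemma join_snoc (xs : List (List Char)) (x : List Char) (sep : List Char) (h : xs ≠ []) :
    PySem.Chars.join sep (xs ++ [x]) = PySem.Chars.join sep xs ++ sep ++ x := by
  induction xs with
  | nil => simp_all
  | cons y t ih =>
    cases t with
    | nil => simp [PySem.Chars.join_cons_cons, PySem.Chars.join_singleton]
    | cons z u =>
        rw [show (y :: z :: u) ++ [x] = y :: ((z :: u) ++ [x]) by simp,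
          show (z :: u) ++ [x] = z :: (u ++ [x]) by simp,
          PySem.Chars.join_cons_cons, PySem.Chars.join_cons_cons,
          ← show (z :: u) ++ [x] = z :: (u ++ [x]) by simp, ih (by simp)]
        simp

-- rows loop writing '\n' before every row but the first (shapes 1–3)
lemma rows_sep_first (a b : Int) (f : Int → List Char) (g : Int → Int) :
    (PySem.List.pyRange a b 1).foldl
      (fun st row => ((if row != a then st.1 ++ ['\n'] else st.1) ++ f row, st.2 + g row)) (([] : List Char), (0 : Int))
    = (PySem.Chars.join ['\n'] ((PySem.List.pyRange a b 1).map f),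
       ((PySem.List.pyRange a b 1).map g).sum) := by
  generalize hm : (b - a).toNat = m
  induction m generalizing b with
  | zero => rw [PySem.List.pyRange_one_eq_nil (by omega)]; simp [PySem.Chars.join_nil]
  | succ k ih =>
    rw [show b = (b - 1) + 1 by ring, PySem.List.pyRange_one_succ_right (by omega)]
    rw [List.foldl_append, ih (b-1) (by omega)]
    simp only [List.foldl_cons, List.foldl_nil, List.map_append, List.map_cons, List.map_nil,
      List.sum_append, List.sum_cons, List.sum_nil]
    rcases Nat.eq_zero_or_pos k with hk | hk
    · have : b - 1 = a := by omega
      subst this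
      rw [PySem.List.pyRange_one_eq_nil (by omega)]
      simp [PySem.Chars.join_nil, PySem.Chars.join_singleton]
    · have hne : ((b - 1) != a) = true := by simp; omega
      rw [join_snoc _ _ _ (by
        intro hcontra
        have := congrArg List.length hcontra
        simp [PySem.List.length_pyRange_one] at this; omega)]
      simp [hne]

-- a loop appending f row (no separator logic) and counting g row
lemma rows_flat (l : List Int) (f : Int → List Char) (g : Int → Int) (st : List Char × Int) :
    l.foldl (fun st row => (st.1 ++ f row, st.2 + g row)) st
      = (st.1 ++ (l.map f).flatten, st.2 + (l.map g).sum) := by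
  induction l generalizing st with
  | nil => simp
  | cons x t ih => simp only [List.foldl_cons, ih, List.map_cons, List.flatten_cons,
      List.append_assoc, List.sum_cons]; refine Prod.ext rfl ?_; simp; ring

-- rows loop writing '\n' after every row but the last (bottom of shape 4)
lemma rows_sep_last (a b : Int) (f : Int → List Char) (g : Int → Int) (st : List Char × Int) :
    (PySem.List.pyRange a b 1).foldl
      (fun st row => (st.1 ++ f row ++ (if row != b - 1 then ['\n'] else []), st.2 + g row)) st
    = (st.1 ++ PySem.Chars.join ['\n'] ((PySem.List.pyRange a b 1).map f),
       st.2 + ((PySem.List.pyRange a b 1).map g).sum) := by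
  generalize hm : (b - a).toNat = m
  induction m generalizing a st with
  | zero =>
    rw [PySem.List.pyRange_one_eq_nil (by omega)]
    simp [PySem.Chars.join_nil]
  | succ k ih =>
    rw [PySem.List.pyRange_one_cons (by omega)]
    simp only [List.foldl_cons, List.map_cons, List.sum_cons]
    rcases Nat.eq_zero_or_pos k with hk | hk
    · have hb : b ≤ a + 1 := by omega
      have h1 : (a != b - 1) = false := by simp; omega
      rw [PySem.List.pyRange_one_eq_nil hb]
      simp [h1, PySem.Chars.join_singleton]
    · have h1 : (a != b - 1) = true := by simp; omega
      rw [ih (a+1) _ (by omega)]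
      have hne : (PySem.List.pyRange (a+1) b 1).map f ≠ [] := by
        intro hcontra
        have := congrArg List.length hcontra
        simp [PySem.List.length_pyRange_one] at this; omega
      cases hm2 : (PySem.List.pyRange (a+1) b 1).map f with
      | nil => exact absurd hm2 hne
      | cons y t =>
        rw [PySem.Chars.join_cons_cons]
        refine Prod.ext ?_ ?_
        · simp [h1]
        · simp; ring

lemma gsA_while_eq (c n_rows size : Int) :
    gsA_while c n_rows size = n_rows + max ((size - c + 2) / 2) 0 := by
  generalize hm : (size + 1 - c).toNat = m
  induction m using Nat.strongRecOn generalizing c n_rows with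
  | ind k ih =>
    rw [gsA_while]
    by_cases h : c ≤ size
    · rw [if_pos h, ih ((size + 1 - (c+2)).toNat) (by omega) (c+2) (n_rows+1) rfl]
      rw [Int.max_def, Int.max_def]
      split_ifs <;> omega
    · rw [if_neg h]
      rw [Int.max_def]
      split_ifs <;> omega

-- triangular / odd sums over python ranges
lemma sum_tri (c : Int) (m : Nat) :
    2 * ((PySem.List.pyRange 0 (m:Int) 1).map (fun r => c - r)).sum = m * (2*c - m + 1) := by
  induction m with
  | zero => simp [PySem.List.pyRange_one_eq_nil]
  | succ k ih =>
    rw [show ((k+1 : Nat) : Int) = (k : Int) + 1 by push_cast; ring,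
      show ((k : Int) + 1) = 0 + (k:Int) + 1 by ring,
      PySem.List.pyRange_one_succ_right (by omega)]
    simp only [List.map_append, List.sum_append, List.map_cons, List.map_nil, List.sum_cons,
      List.sum_nil, zero_add] at *
    push_cast
    nlinarith [ih]

lemma sum_id2 (m : Nat) :
    2 * ((PySem.List.pyRange 1 (1+(m:Int)) 1).map (fun r => r)).sum = m * (m+1) := by
  induction m with
  | zero => simp [PySem.List.pyRange_one_eq_nil]
  | succ k ih =>
    rw [show (1 + ((k+1 : Nat)) : Int) = (1 + (k : Int)) + 1 by push_cast; ring,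
      PySem.List.pyRange_one_succ_right (by omega)]
    simp only [List.map_append, List.sum_append, List.map_cons, List.map_nil, List.sum_cons,
      List.sum_nil] at *
    push_cast
    nlinarith [ih]

lemma sum_odd (m : Nat) :
    ((PySem.List.pyRange 1 (1+(m:Int)) 1).map (fun r => 2*r-1)).sum = (m:Int) * m := by
  induction m with
  | zero => simp [PySem.List.pyRange_one_eq_nil]
  | succ k ih =>
    rw [show (1 + ((k+1 : Nat)) : Int) = (1 + (k : Int)) + 1 by push_cast; ring,
      PySem.List.pyRange_one_succ_right (by omega)]
    simp only [List.map_append, List.sum_append, List.map_cons, List.map_nil, List.sum_cons,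
      List.sum_nil] at *
    push_cast
    nlinarith [ih]

lemma shape1_eq (size : Int) : generate_shape 1 size = generate_shape_alt 1 size := by
  unfold generate_shape generate_shape_alt
  simp only [show ((1:Int) == 1) = true from rfl, if_true]
  rcases (by omega : size ≤ 0 ∨ 0 < size) with hs | hs
  · rw [show max size 0 = 0 by omega, PySem.List.pyRange_one_eq_nil hs,
      PySem.List.pyRange_one_eq_nil (by omega : (0:Int) ≤ 0)]
    simp [PySem.Chars.join_nil]
  · have hcast : ((size.toNat : Int)) = size := by omega
    have hmax : max size 0 = size := by omega
    have key := PySem.List.foldl_congr_mem (PySem.List.pyRange 0 size 1)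
      (fun (st : List Char × Int) (row : Int) =>
        (PySem.List.pyRange 0 size 1).foldl (fun st _ => (st.1 ++ ['*', ' '], st.2 + 1))
          (if row != 0 then (st.1 ++ ['\n'], st.2) else st))
      (fun (st : List Char × Int) (row : Int) =>
        ((if row != 0 then st.1 ++ ['\n'] else st.1) ++ (List.replicate size.toNat ['*', ' ']).flatten,
          st.2 + size))
      ([], 0)
      (by
        intro acc x hx
        beta_reduce
        rw [foldl_const_chunk, PySem.List.length_pyRange_one]
        by_cases h0 : (x != 0) = true <;> simp [h0, hcast])
    rw [key, rows_sep_first, hmax]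
    refine Prod.ext ?_ ?_
    · simp only [pyRepeat_eq_flatten]
    · rw [PySem.List.sum_map_const_int, PySem.List.length_pyRange_one]
      simp
      omega

lemma shape2_eq (size : Int) : generate_shape 2 size = generate_shape_alt 2 size := by
  unfold generate_shape generate_shape_alt
  simp only [show ((2:Int) == 1) = false from rfl, show ((2:Int) == 2) = true from rfl,
    Bool.false_eq_true, if_false, if_true]
  rcases (by omega : size ≤ 0 ∨ 0 < size) with hs | hs
  · rw [show max size 0 = 0 by omega, PySem.List.pyRange_one_eq_nil (by omega : size + 1 ≤ 1),
      PySem.List.pyRange_one_eq_nil (by omega : (0:Int) + 1 ≤ 1)]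
    simp [PySem.Chars.join_nil]
  · have hmax : max size 0 = size := by omega
    have key := PySem.List.foldl_congr_mem (PySem.List.pyRange 1 (size + 1) 1)
      (fun (st : List Char × Int) (row : Int) =>
        (PySem.List.pyRange 0 row 1).foldl (fun st _ => (st.1 ++ ['*', ' '], st.2 + 1))
          ((PySem.List.pyRange 0 (size - row) 1).foldl (fun st _ => (st.1 ++ [' ', ' '], st.2))
            (if row != 1 then (st.1 ++ ['\n'], st.2) else st)))
      (fun (st : List Char × Int) (row : Int) =>
        ((if row != 1 then st.1 ++ ['\n'] else st.1) ++
            ((List.replicate (size - row).toNat [' ', ' ']).flatten ++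
              (List.replicate row.toNat ['*', ' ']).flatten),
          st.2 + row))
      ([], 0)
      (by
        intro acc x hx
        have hxb := (PySem.List.mem_pyRange_one).1 hx
        have hxx : (((x - 0).toNat : Int)) = x := by omega
        beta_reduce
        rw [foldl_const_chunk0, foldl_const_chunk, PySem.List.length_pyRange_one,
          PySem.List.length_pyRange_one]
        by_cases h0 : (x != 1) = true <;> simp [h0, hxx, List.append_assoc] <;> omega)
    rw [key, rows_sep_first, hmax]
    refine Prod.ext ?_ ?_
    · simp only [pyRepeat_eq_flatten]
    · have h2 := sum_id2 size.toNat
      rw [show 1 + ((size.toNat : Nat) : Int) = size + 1 by omega] at h2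
      rw [floordiv_two]
      have hc : ((size.toNat : Nat) : Int) = size := by omega
      rw [hc] at h2
      generalize hP : size * (size + 1) = P at *
      omega

lemma shape3_eq (size : Int) : generate_shape 3 size = generate_shape_alt 3 size := by
  unfold generate_shape generate_shape_alt
  simp only [show ((3:Int) == 1) = false from rfl, show ((3:Int) == 2) = false from rfl,
    show ((3:Int) == 3) = true from rfl, Bool.false_eq_true, if_false, if_true]
  rcases (by omega : size ≤ 0 ∨ 0 < size) with hs | hs
  · rw [show max size 0 = 0 by omega, PySem.List.pyRange_one_eq_nil hs,
      PySem.List.pyRange_one_eq_nil (by omega : (0:Int) ≤ 0)]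
    simp [PySem.Chars.join_nil]
  · have hmax : max size 0 = size := by omega
    have key := PySem.List.foldl_congr_mem (PySem.List.pyRange 0 size 1)
      (fun (st : List Char × Int) (row : Int) =>
        (PySem.List.pyRange 0 (size - row) 1).foldl (fun st _ => (st.1 ++ ['*', ' '], st.2 + 1))
          ((PySem.List.pyRange 0 row 1).foldl (fun st _ => (st.1 ++ [' '], st.2))
            (if row != 0 then (st.1 ++ ['\n'], st.2) else st)))
      (fun (st : List Char × Int) (row : Int) =>
        ((if row != 0 then st.1 ++ ['\n'] else st.1) ++
            ((List.replicate row.toNat [' ']).flatten ++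
              (List.replicate (size - row).toNat ['*', ' ']).flatten),
          st.2 + (size - row)))
      ([], 0)
      (by
        intro acc x hx
        have hxb := (PySem.List.mem_pyRange_one).1 hx
        have hxx : (((size - x - 0).toNat : Int)) = size - x := by omega
        beta_reduce
        rw [foldl_const_chunk0, foldl_const_chunk, PySem.List.length_pyRange_one,
          PySem.List.length_pyRange_one]
        by_cases h0 : (x != 0) = true <;> simp [h0, hxx, List.append_assoc] <;> omega)
    rw [key, rows_sep_first, hmax]
    refine Prod.ext ?_ ?_
    · simp only [pyRepeat_eq_flatten]
    · have h2 := sum_tri size size.toNat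
      rw [show ((size.toNat : Nat) : Int) = size by omega] at h2
      have h2' : 2 * ((PySem.List.pyRange 0 size 1).map (HSub.hSub size)).sum
          = size * (2 * size - size + 1) := h2
      rw [floordiv_two]
      have h3 : size * (2 * size - size + 1) = size * (size + 1) := by ring
      rw [h3] at h2'
      generalize hP : size * (size + 1) = P at *
      omega

lemma shape4_eq (size : Int) : generate_shape 4 size = generate_shape_alt 4 size := by
  unfold generate_shape generate_shape_alt
  simp only [show ((4:Int) == 1) = false from rfl, show ((4:Int) == 2) = false from rfl,
    show ((4:Int) == 3) = false from rfl, show ((4:Int) == 4) = true from rfl,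
    Bool.false_eq_true, if_false, if_true]
  rw [gsA_while_eq, floordiv_two]
  rcases (by omega : size ≤ 0 ∨ 0 < size) with hs | hs
  · rw [show (0:Int) + max ((size - 1 + 2) / 2) 0 = 0 by omega,
      show max size 0 = 0 by omega,
      show ((0:Int) + 1) / 2 = 0 by norm_num]
    rw [PySem.List.pyRange_neg_one_eq_nil le_rfl,
      PySem.List.pyRange_one_eq_nil (by omega : (0:Int) + 1 ≤ 2)]
    simp [PySem.Chars.join_nil]
  · rw [show max size 0 = size by omega,
      show (0:Int) + max ((size - 1 + 2) / 2) 0 = (size + 1) / 2 by omega]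
    set mI : Int := (size + 1) / 2 with hmI
    have hm1 : 1 ≤ mI := by omega
    have hM : ((mI.toNat : Nat) : Int) = mI := by omega
    have key1 := PySem.List.foldl_congr_mem (PySem.List.pyRange mI 0 (-1))
      (fun (st : List Char × Int) (row : Int) =>
        (((PySem.List.pyRange 1 (2 * row) 1).foldl (fun st _ => (st.1 ++ ['*'], st.2 + 1))
            ((PySem.List.pyRange 0 (mI - row) 1).foldl (fun st _ => (st.1 ++ [' '], st.2)) st)).1 ++ ['\n'],
         ((PySem.List.pyRange 1 (2 * row) 1).foldl (fun st _ => (st.1 ++ ['*'], st.2 + 1))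
            ((PySem.List.pyRange 0 (mI - row) 1).foldl (fun st _ => (st.1 ++ [' '], st.2)) st)).2))
      (fun (st : List Char × Int) (row : Int) =>
        (st.1 ++ ((List.replicate (mI - row).toNat [' ']).flatten ++
            ((List.replicate (2 * row - 1).toNat ['*']).flatten ++ ['\n'])),
         st.2 + (2 * row - 1)))
      ([], 0)
      (by
        intro acc x hx
        have hxb := (PySem.List.mem_pyRange_neg_one).1 hx
        have hxx : (((2 * x - 1).toNat : Int)) = 2 * x - 1 := by omega
        beta_reduce
        rw [foldl_const_chunk0, foldl_const_chunk, PySem.List.length_pyRange_one,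
          PySem.List.length_pyRange_one]
        simp [hxx, List.append_assoc]
        omega)
    have key2 : ∀ st0 : List Char × Int,
        (PySem.List.pyRange 2 (mI + 1) 1).foldl
          (fun (st : List Char × Int) (row : Int) =>
            if (row != mI) = true then
              (((PySem.List.pyRange 1 (2 * row) 1).foldl (fun st _ => (st.1 ++ ['*'], st.2 + 1))
                  ((PySem.List.pyRange 0 (mI - row) 1).foldl (fun st _ => (st.1 ++ [' '], st.2)) st)).1 ++ ['\n'],
               ((PySem.List.pyRange 1 (2 * row) 1).foldl (fun st _ => (st.1 ++ ['*'], st.2 + 1))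
                  ((PySem.List.pyRange 0 (mI - row) 1).foldl (fun st _ => (st.1 ++ [' '], st.2)) st)).2)
            else
              (PySem.List.pyRange 1 (2 * row) 1).foldl (fun st _ => (st.1 ++ ['*'], st.2 + 1))
                ((PySem.List.pyRange 0 (mI - row) 1).foldl (fun st _ => (st.1 ++ [' '], st.2)) st)) st0
        = (PySem.List.pyRange 2 (mI + 1) 1).foldl
            (fun (st : List Char × Int) (row : Int) =>
              (st.1 ++ ((List.replicate (mI - row).toNat [' ']).flatten ++
                  (List.replicate (2 * row - 1).toNat ['*']).flatten) ++
                (if row != (mI + 1) - 1 then ['\n'] else []),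
               st.2 + (2 * row - 1))) st0 := by
      intro st0
      refine PySem.List.foldl_congr_mem _ _ _ st0 ?_
      intro acc x hx
      have hxb := (PySem.List.mem_pyRange_one).1 hx
      have hxx : (((2 * x - 1).toNat : Int)) = 2 * x - 1 := by omega
      have hcond : (x != mI + 1 - 1) = (x != mI) := by norm_num
      beta_reduce
      rw [foldl_const_chunk0, foldl_const_chunk, PySem.List.length_pyRange_one,
        PySem.List.length_pyRange_one]
      by_cases h0 : (x != mI) = true <;> simp [h0, hcond, hxx, List.append_assoc] <;> omega
    rw [key1, rows_flat, key2, rows_sep_last]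
    refine Prod.ext ?_ ?_
    · rw [join_nil_sep]
      simp only [pyRepeat_eq_flatten]
      simp [List.append_assoc]
    · have hodd := sum_odd mI.toNat
      rw [hM] at hodd
      have hdesc : ((PySem.List.pyRange mI 0 (-1)).map (fun r => 2 * r - 1)).sum
          = mI * mI := by
        rw [PySem.List.pyRange_neg_one_eq_reverse, List.map_reverse, List.sum_reverse,
          show (0:Int) + 1 = 1 by norm_num, show mI + 1 = 1 + mI by ring]
        exact hodd
      have hbot : ((PySem.List.pyRange 2 (mI + 1) 1).map (fun r => 2 * r - 1)).sum
          = mI * mI - 1 := by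
        have h := hodd
        rw [show (1:Int) + mI = mI + 1 by ring] at h
        rw [PySem.List.pyRange_one_cons (by omega : (1:Int) < mI + 1),
          show (1:Int) + 1 = 2 by norm_num] at h
        simp only [List.map_cons, List.sum_cons] at h
        omega
      rw [hdesc, hbot, show (mI != 0) = true by simp; omega]
      split_ifs with hcnd
      · ring
      · simp at hcnd

-- ===== VERDICT (by name: the statement is the Claim_ definition above) =====
theorem generate_shape_spec : Claim_equal_generate_shape := by
  intro shape_id size _
  unfold Spec_generate_shape
  by_cases h1 : shape_id = 1
  · subst h1; exact shape1_eq size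
  by_cases h2 : shape_id = 2
  · subst h2; exact shape2_eq size
  by_cases h3 : shape_id = 3
  · subst h3; exact shape3_eq size
  by_cases h4 : shape_id = 4
  · subst h4; exact shape4_eq size
  · unfold generate_shape generate_shape_alt
    simp [h1, h2, h3, h4]
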